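-- pv_equiv track=rewrite | github.com/choudaryhussainali/200problems_Mastering_PYTHON_part-2 | PYTHON_Problems/problem_120.py | rearrange_alternate
-- ===== SOURCE A (Python) =====
-- def rearrange_alternate(nums):
--     pos = [x for x in nums if x >= 0]
--     neg = [x for x in nums if x < 0]
--     result = []
--     while pos or neg:
--         if pos: result.append(pos.pop(0))
--         if neg: result.append(neg.pop(0))
--     return result
-- ===== SOURCE B (Python) =====
-- def rearrange_alternate(nums):
--     pos = [x for x in nums if x >= 0]
--     neg = [x for x in nums if x < 0]
--     k = min(len(pos), len(neg))
--     head = [v for pair in zip(pos, neg) for v in pair]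
--     return head + pos[k:] + neg[k:]
-- ===== Notes on version B (the rewrite author's own statement) =====
-- stated objective: idiomatic
-- what changed: Replaces the destructive while-loop that pops from the fronts of pos/neg with zip-and-flatten of the paired prefix plus the leftover tail slices; no quadratic pop(0).
import Mathlib
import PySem

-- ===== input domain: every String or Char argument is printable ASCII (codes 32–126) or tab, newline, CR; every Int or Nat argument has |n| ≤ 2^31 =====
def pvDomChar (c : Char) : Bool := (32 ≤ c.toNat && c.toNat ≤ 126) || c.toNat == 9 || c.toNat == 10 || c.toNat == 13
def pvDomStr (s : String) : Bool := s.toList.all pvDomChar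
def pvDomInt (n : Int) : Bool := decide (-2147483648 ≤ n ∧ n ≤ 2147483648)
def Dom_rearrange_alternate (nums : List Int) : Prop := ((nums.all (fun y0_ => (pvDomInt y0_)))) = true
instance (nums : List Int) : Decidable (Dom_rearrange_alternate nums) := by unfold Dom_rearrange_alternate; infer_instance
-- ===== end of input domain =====

-- B replaces A's quadratic while-loop popping from the fronts of pos/neg by a zip-and-flatten
-- of the paired prefix plus the leftover tail slices (idiomatic, O(n)).

-- ===== PORT A =====
-- the while-loop: while pos or neg: if pos append pos.pop(0); if neg append neg.pop(0)
def rearrangeLoopA : List Int → List Int → List Int → List Int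
  | [], [], res => res
  | p :: ps, [], res => rearrangeLoopA ps [] (res ++ [p])
  | [], n :: ns, res => rearrangeLoopA [] ns (res ++ [n])
  | p :: ps, n :: ns, res => rearrangeLoopA ps ns (res ++ [p] ++ [n])

def rearrange_alternate (nums : List Int) : List Int :=
  let pos := nums.filter (fun x => x ≥ 0)
  let neg := nums.filter (fun x => x < 0)
  rearrangeLoopA pos neg []

-- ===== PORT B =====
def rearrange_alternate_alt (nums : List Int) : List Int :=
  let pos := nums.filter (fun x => x ≥ 0)
  let neg := nums.filter (fun x => x < 0)
  let k : Nat := min pos.length neg.length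
  let head := (pos.zip neg).flatMap (fun pr => [pr.1, pr.2])
  head ++ PySem.List.slice pos (some (k : Int)) none ++ PySem.List.slice neg (some (k : Int)) none

-- ===== PRECONDITION & SPEC =====
def Spec_rearrange_alternate (nums : List Int) (out : List Int) : Prop := out = rearrange_alternate_alt nums
instance (nums : List Int) (out : List Int) : Decidable (Spec_rearrange_alternate nums out) := by unfold Spec_rearrange_alternate; infer_instance

-- ===== CLAIM (what is proved, stated in full; the proofs are below) =====
def Claim_equal_rearrange_alternate : Prop := ∀ (nums : List Int), Dom_rearrange_alternate nums → Spec_rearrange_alternate nums (rearrange_alternate nums)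

-- ===== LEMMAS AND PROOFS =====
theorem rearrangeLoopA_eq (pos : List Int) : ∀ (neg res : List Int),
    rearrangeLoopA pos neg res =
      res ++ (pos.zip neg).flatMap (fun pr => [pr.1, pr.2])
          ++ pos.drop (min pos.length neg.length) ++ neg.drop (min pos.length neg.length) := by
  induction pos with
  | nil =>
    intro neg res
    induction neg generalizing res with
    | nil => simp [rearrangeLoopA]
    | cons n ns ih => simp [rearrangeLoopA, ih]
  | cons p ps ih =>
    intro neg res
    cases neg with
    | nil =>
      have tail : ∀ (qs res : List Int), rearrangeLoopA qs [] res = res ++ qs := by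
        intro qs
        induction qs with
        | nil => intro res; simp [rearrangeLoopA]
        | cons q qs ih2 => intro res; simp [rearrangeLoopA, ih2]
      simp [tail]
    | cons n ns =>
      simp only [rearrangeLoopA, ih ns]
      simp [Nat.succ_min_succ]

theorem rearrange_alternate_spec : Claim_equal_rearrange_alternate := by
  intro nums _
  unfold Spec_rearrange_alternate rearrange_alternate rearrange_alternate_alt
  simp [rearrangeLoopA_eq, ← Nat.cast_min, PySem.List.slice_from_natCast]
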